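-- pv_equiv track=rewrite | github.com/konstin/knn-for-homology | pfam/proteins_shared.py | get_homologous_proteins
-- ===== SOURCE A (Python) =====
-- from collections import defaultdict
-- from itertools import chain
-- from typing import Tuple, Dict, List, Set
--
-- def get_homologous_proteins(
--     protein_to_domain: Dict[str, List[str]]
-- ) -> Dict[str, Set[str]]:
--     protein_domains = {
--         protein: set(i[0] for i in domains)
--         for protein, domains in protein_to_domain.items()
--     }
--
--     domain_proteins = defaultdict(set)
--     for protein, domains in protein_domains.items():
--         for domain in domains:
--             domain_proteins[domain].add(protein)
--     domain_proteins = dict(domain_proteins)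
--
--     # Note: This object is huge for some reason
--     homologous_proteins = dict()
--     for protein, domains in protein_domains.items():
--         homologs = set(chain(*(domain_proteins[domain] for domain in domains)))
--         homologs.remove(protein)
--         homologous_proteins[protein] = homologs
--
--     return homologous_proteins
-- ===== SOURCE B (Python) =====
-- def get_homologous_proteins(protein_to_domain):
--     # Index-free alternative: instead of building A's inverted index
--     # (domain -> proteins) and unioning buckets, walk each protein's distinct
--     # domain ids and RESCAN the protein list for sharers of that id,
--     # deduplicating on the fly.
--     firsts = [(p, {d[0] for d in ds}) for p, ds in protein_to_domain.items()]
--     result = {}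
--     for p, cs in firsts:
--         homologs = []
--         for c in cs:
--             for q, qcs in firsts:
--                 if c in qcs and q != p and q not in homologs:
--                     homologs.append(q)
--         result[p] = set(homologs)
--     return result
-- ===== Notes on version B (the rewrite author's own statement) =====
-- stated objective: alternative
-- what changed: A builds an inverted index (domain id -> set of proteins) and unions the buckets per protein; B builds no index at all: for each protein it rescans the whole protein list once per distinct domain id, collecting sharers with an on-the-fly dedup/self-skip, trading A's index memory and chain/set machinery for repeated linear scans.
-- outside the precondition, e.g. on get_homologous_proteins({'p': []}): A raises KeyError, B returns {'p': set()}; on get_homologous_proteins({'p': [''], 'q': ['a']}): A raises IndexError, B raises IndexError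
-- crash fix: When every domain string is nonempty but some protein has an empty domain list, A raises KeyError at homologs.remove(protein); B returns that protein mapped to the empty set. — e.g. on get_homologous_proteins([("p", [])]): A raises KeyError, B returns [("p", [])]
import Mathlib
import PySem

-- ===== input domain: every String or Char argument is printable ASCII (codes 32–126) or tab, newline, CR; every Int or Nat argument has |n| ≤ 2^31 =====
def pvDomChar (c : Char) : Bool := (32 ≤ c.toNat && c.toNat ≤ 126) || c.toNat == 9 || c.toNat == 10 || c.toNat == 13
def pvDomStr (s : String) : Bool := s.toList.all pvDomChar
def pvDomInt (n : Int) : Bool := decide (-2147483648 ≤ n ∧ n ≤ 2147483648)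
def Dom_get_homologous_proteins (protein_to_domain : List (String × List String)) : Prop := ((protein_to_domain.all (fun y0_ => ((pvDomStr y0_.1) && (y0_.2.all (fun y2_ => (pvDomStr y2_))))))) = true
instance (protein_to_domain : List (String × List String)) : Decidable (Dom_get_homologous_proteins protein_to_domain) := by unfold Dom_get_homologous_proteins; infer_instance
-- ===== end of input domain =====

-- B drops A's inverted index (domain -> proteins) entirely: per protein it rescans the protein list
-- for sharers of each of its domain ids, deduplicating on the fly (objective: alternative, index-free;
-- equivalence of the RETURN value).

-- ===== PORT A =====
-- i[0] on a domain string; Python raises IndexError on "" — excluded by Pre_, so the default is never used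
def pvFirstChar (s : String) : Char := (PySem.Str.pyGet? s 0).getD ' '

-- homologs.remove(protein): Python raises KeyError when protein ∉ homologs (excluded by Pre_); total form
def pvSetRemoveD (s : PySem.Set String) (x : String) : PySem.Set String :=
  (PySem.Set.remove? s x).getD s

def get_homologous_proteins (protein_to_domain : List (String × List String)) : List (String × List String) :=
  -- protein_domains = {protein: set(i[0] for i in domains), ...}: dict comprehension over .items();
  -- exact as a plain map for the distinct keys Pre_ guarantees
  let protein_domains : List (String × PySem.Set Char) :=
    protein_to_domain.map (fun pd => (pd.1, PySem.Set.ofList (pd.2.map pvFirstChar)))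
  -- domain_proteins = defaultdict(set); for protein, domains …: for domain in domains: …[domain].add(protein)
  let domain_proteins : PySem.Dict Char (PySem.Set String) :=
    protein_domains.foldl
      (fun d pd => pd.2.foldl (fun d c => d.modify c PySem.Set.empty (fun s => PySem.Set.add s pd.1)) d)
      PySem.Dict.empty
  -- homologs = set(chain(*(domain_proteins[domain] for domain in domains))); homologs.remove(protein)
  protein_domains.map (fun pd =>
    (pd.1, pvSetRemoveD (PySem.Set.ofList (pd.2.flatMap (fun c => domain_proteins.getD c PySem.Set.empty))) pd.1))

-- ===== PORT B =====
def get_homologous_proteins_alt (protein_to_domain : List (String × List String)) : List (String × List String) :=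
  -- firsts = [(p, {d[0] for d in ds}) for p, ds in protein_to_domain.items()]
  let firsts : List (String × PySem.Set Char) :=
    protein_to_domain.map (fun pd => (pd.1, PySem.Set.ofList (pd.2.map pvFirstChar)))
  -- for p, cs in firsts: homologs = []; for c in cs: for q, qcs in firsts:
  --   if c in qcs and q != p and q not in homologs: homologs.append(q)
  -- result[p] = set(homologs)
  firsts.map (fun pc =>
    (pc.1,
      PySem.Set.ofList
        (pc.2.foldl (fun homologs c =>
            firsts.foldl (fun homologs qd =>
              if PySem.Set.contains qd.2 c ∧ qd.1 ≠ pc.1 ∧ qd.1 ∉ homologs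
              then homologs ++ [qd.1] else homologs) homologs)
          ([] : List String))))

-- ===== PRECONDITION & SPEC =====
-- Pre_ excludes: association lists with duplicate protein keys (the Python dict argument collapses them,
-- so they represent no distinct Python input); a protein with an empty domain list (A's homologs.remove
-- raises KeyError); and an empty domain string (i[0] raises IndexError).
def Pre_get_homologous_proteins (protein_to_domain : List (String × List String)) : Prop :=
  (protein_to_domain.map Prod.fst).Nodup ∧
  ∀ pd ∈ protein_to_domain, pd.2 ≠ [] ∧ ∀ s ∈ pd.2, s ≠ ""
instance (protein_to_domain : List (String × List String)) : Decidable (Pre_get_homologous_proteins protein_to_domain) := by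
  unfold Pre_get_homologous_proteins; infer_instance

def pvWitness_get_homologous_proteins : (List (String × List String)) :=
  [("p", ["ab", "cd"]), ("q", ["a"]), ("r", ["c"])]

-- On inputs whose domain strings are nonempty but where some protein has an EMPTY domain list, A raises
-- KeyError (homologs.remove(protein) on an empty set) while B returns that protein mapped to the empty set.
def Raises_get_homologous_proteins (protein_to_domain : List (String × List String)) : Prop :=
  (protein_to_domain.map Prod.fst).Nodup ∧
  (∀ pd ∈ protein_to_domain, ∀ s ∈ pd.2, s ≠ "") ∧
  ∃ pd ∈ protein_to_domain, pd.2 = []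
instance (protein_to_domain : List (String × List String)) : Decidable (Raises_get_homologous_proteins protein_to_domain) := by
  unfold Raises_get_homologous_proteins; infer_instance

def pvRaiseWitness_get_homologous_proteins : (List (String × List String)) := [("p", [])]
def pvRaiseWitnessOut_get_homologous_proteins : List (String × List String) := [("p", [])]

def Spec_get_homologous_proteins (protein_to_domain : List (String × List String)) (out : List (String × List String)) : Prop := out = get_homologous_proteins_alt protein_to_domain
instance (protein_to_domain : List (String × List String)) (out : List (String × List String)) : Decidable (Spec_get_homologous_proteins protein_to_domain out) := by unfold Spec_get_homologous_proteins; infer_instance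

-- ===== CLAIM (what is proved, stated in full; the proofs are below) =====
def Claim_equal_get_homologous_proteins : Prop := ∀ (protein_to_domain : List (String × List String)), Dom_get_homologous_proteins protein_to_domain → Pre_get_homologous_proteins protein_to_domain → Spec_get_homologous_proteins protein_to_domain (get_homologous_proteins protein_to_domain)

def Claim_raises_get_homologous_proteins : Prop :=
  (∀ (protein_to_domain : List (String × List String)), Dom_get_homologous_proteins protein_to_domain → Raises_get_homologous_proteins protein_to_domain → ¬ Pre_get_homologous_proteins protein_to_domain) ∧
  (Dom_get_homologous_proteins (pvRaiseWitness_get_homologous_proteins) ∧ Raises_get_homologous_proteins (pvRaiseWitness_get_homologous_proteins) ∧ get_homologous_proteins_alt (pvRaiseWitness_get_homologous_proteins) = pvRaiseWitnessOut_get_homologous_proteins)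

-- ===== LEMMAS AND PROOFS =====

theorem pv_ofList_filter {α : Type} [BEq α] [LawfulBEq α] (pred : α → Bool) (xs : List α) :
    PySem.Set.ofList (xs.filter pred) = (PySem.Set.ofList xs).filter pred := by
  induction xs with
  | nil => simp [PySem.Set.ofList_nil]
  | cons x t ih =>
    by_cases hx : pred x
    · simp only [List.filter_cons, hx, if_pos trivial, PySem.Set.ofList_cons, ih,
        PySem.Set.discard, List.filter_comm]
    · simp only [List.filter_cons, hx, PySem.Set.ofList_cons, ih, PySem.Set.discard,
        Bool.false_eq_true, ite_false]
      rw [List.filter_comm]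
      refine (List.filter_eq_self.mpr ?_).symm
      intro y hy
      rcases List.mem_filter.mp hy with ⟨_, hpy⟩
      simp only [Bool.not_eq_eq_eq_not, Bool.not_true, beq_eq_false_iff_ne, ne_eq]
      rintro rfl
      exact hx hpy

theorem pv_removeD (xs : List String) (p : String) :
    pvSetRemoveD (PySem.Set.ofList xs) p
      = PySem.Set.ofList (xs.filter (fun q => q ≠ p)) := by
  unfold pvSetRemoveD
  by_cases hp : p ∈ xs
  · have hc : (PySem.Set.ofList xs).contains p = true := by
      simp [PySem.Set.mem_ofList, hp]
    simp only [PySem.Set.remove?, hc, if_pos trivial, Option.getD_some]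
    rw [pv_ofList_filter]
    simp only [PySem.Set.discard]
    apply List.filter_congr
    intro y _
    by_cases h : y = p <;> simp [h]
  · have hc : ¬ (PySem.Set.ofList xs).contains p = true := by
      simp [PySem.Set.mem_ofList, hp]
    simp only [PySem.Set.remove?, Bool.not_eq_true] at hc ⊢
    rw [hc]
    simp only [Bool.false_eq_true, if_false, Option.getD_none]
    rw [List.filter_eq_self.mpr]
    intro y hy
    simp only [ne_eq, decide_eq_true_eq]
    rintro rfl
    exact hp hy

theorem pv_getD_fold (p : String) (S : List Char) (hS : S.Nodup) (d : PySem.Dict Char (List String)) (c : Char) :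
    (S.foldl (fun d c => d.modify c [] (fun l => l ++ [p])) d).getD c []
      = if c ∈ S then d.getD c [] ++ [p] else d.getD c [] := by
  induction S generalizing d with
  | nil => simp
  | cons c0 t ih =>
    rcases List.nodup_cons.mp hS with ⟨hc0, ht⟩
    simp only [List.foldl_cons, ih ht, List.mem_cons]
    by_cases h : c = c0
    · subst h
      have : c ∉ t := hc0
      rw [if_neg this, if_pos (Or.inl rfl)]
      rw [PySem.Dict.getD_modify_self]
    · rw [PySem.Dict.getD_modify_of_ne _ _ _ h]
      by_cases h2 : c ∈ t <;> simp [h, h2]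

theorem pv_fold_add_eq_app (p : String) (S : List Char) (hS : S.Nodup)
    (d : PySem.Dict Char (List String)) (h : ∀ c ∈ S, p ∉ d.getD c []) :
    S.foldl (fun d c => d.modify c PySem.Set.empty (fun s => PySem.Set.add s p)) d
      = S.foldl (fun d c => d.modify c [] (fun l => l ++ [p])) d := by
  induction S generalizing d with
  | nil => rfl
  | cons c0 t ih =>
    rcases List.nodup_cons.mp hS with ⟨hc0, ht⟩
    simp only [List.foldl_cons]
    have hadd : PySem.Set.add (d.getD c0 PySem.Set.empty) p = d.getD c0 [] ++ [p] := by
      exact PySem.Set.add_of_not_mem (h c0 (List.mem_cons_self))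
    have hmod : d.modify c0 PySem.Set.empty (fun s => PySem.Set.add s p)
        = d.modify c0 [] (fun l => l ++ [p]) := by
      simp only [PySem.Dict.modify]
      rw [hadd]
    rw [hmod]
    apply ih ht
    intro c hc
    rw [PySem.Dict.getD_modify_of_ne]
    · exact h c (List.mem_cons_of_mem _ hc)
    · rintro rfl; exact hc0 hc

theorem pv_outer (l : List (String × List String)) (d : PySem.Dict Char (List String))
    (hnd : (l.map Prod.fst).Nodup)
    (hinv : ∀ c q, q ∈ d.getD c [] → q ∉ l.map Prod.fst) :
    l.foldl (fun d pd => (PySem.Set.ofList (pd.2.map pvFirstChar)).foldl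
        (fun d c => d.modify c PySem.Set.empty (fun s => PySem.Set.add s pd.1)) d) d
      = l.foldl (fun d pd => (PySem.Set.ofList (pd.2.map pvFirstChar)).foldl
          (fun d c => d.modify c [] (fun l => l ++ [pd.1])) d) d := by
  induction l generalizing d with
  | nil => rfl
  | cons pd t ih =>
    rcases List.nodup_cons.mp hnd with ⟨hp, ht⟩
    simp only [List.foldl_cons]
    rw [pv_fold_add_eq_app pd.1 _ (PySem.Set.nodup_ofList _) d
      (fun c _ => fun hmem => (hinv c pd.1 hmem) (by simp))]
    have hinv' : ∀ c q, q ∈ ((PySem.Set.ofList (pd.2.map pvFirstChar)).foldl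
        (fun d c => d.modify c [] (fun l => l ++ [pd.1])) d).getD c [] → q ∉ t.map Prod.fst := by
      intro c q hq hqt
      rw [pv_getD_fold pd.1 _ (PySem.Set.nodup_ofList _) d c] at hq
      by_cases hc : c ∈ PySem.Set.ofList (pd.2.map pvFirstChar)
      · rw [if_pos hc] at hq
        rcases List.mem_append.mp hq with h1 | h2
        · exact hinv c q h1 (List.mem_cons_of_mem _ hqt)
        · rcases List.mem_singleton.mp h2 with rfl
          exact hp hqt
      · rw [if_neg hc] at hq
        exact hinv c q hq (List.mem_cons_of_mem _ hqt)
    rw [ih _ ht hinv']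

-- the bucket for a domain id c: the proteins whose char-set contains c, in key order
def pvBucket (firsts : List (String × PySem.Set Char)) (c : Char) : List String :=
  (firsts.filter (fun qd => PySem.Set.contains qd.2 c)).map Prod.fst

theorem pv_getD_scatter (L : List (String × PySem.Set Char)) (hL : ∀ pd ∈ L, pd.2.Nodup)
    (d : PySem.Dict Char (List String)) (c : Char) :
    (L.foldl (fun d pd => pd.2.foldl (fun d c => d.modify c [] (fun l => l ++ [pd.1])) d) d).getD c []
      = d.getD c [] ++ pvBucket L c := by
  induction L generalizing d with
  | nil => simp [pvBucket]
  | cons pd t ih =>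
    simp only [List.foldl_cons]
    rw [ih (fun q hq => hL q (List.mem_cons_of_mem _ hq))]
    rw [pv_getD_fold pd.1 pd.2 (hL pd List.mem_cons_self) d c]
    simp only [pvBucket, List.filter_cons]
    by_cases hc : c ∈ pd.2 <;> simp [hc, List.append_assoc]

-- B's inner loop over the protein list equals the plain dedup-skip fold over the bucket of c
theorem pv_inner_scan (L : List (String × PySem.Set Char)) (c : Char) (p : String) (acc : List String) :
    L.foldl (fun h qd =>
        if PySem.Set.contains qd.2 c ∧ qd.1 ≠ p ∧ qd.1 ∉ h then h ++ [qd.1] else h) acc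
      = (pvBucket L c).foldl (fun h q => if q ≠ p ∧ q ∉ h then h ++ [q] else h) acc := by
  induction L generalizing acc with
  | nil => simp [pvBucket]
  | cons qd t ih =>
    simp only [List.foldl_cons, pvBucket, List.filter_cons]
    by_cases hc : PySem.Set.contains qd.2 c = true
    · simp only [hc, true_and, if_pos trivial, List.map_cons, List.foldl_cons]
      simpa [pvBucket] using ih _
    · simp only [Bool.not_eq_true] at hc
      simp only [hc, Bool.false_eq_true, false_and, if_false]
      simpa [pvBucket] using ih acc

-- the dedup-skip fold is Set.add over the self-filtered stream
theorem pv_skip_eq_add (p : String) (xs : List String) (acc : List String) :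
    xs.foldl (fun h q => if q ≠ p ∧ q ∉ h then h ++ [q] else h) acc
      = (xs.filter (fun q => q ≠ p)).foldl PySem.Set.add acc := by
  induction xs generalizing acc with
  | nil => rfl
  | cons x t ih =>
    simp only [List.foldl_cons, List.filter_cons]
    by_cases hx : x = p
    · subst hx
      simp only [ne_eq, not_true_eq_false, false_and, if_false, decide_false,
        Bool.false_eq_true, ite_false]
      exact ih acc
    · simp only [ne_eq, hx, not_false_eq_true, true_and, decide_true, if_pos trivial,
        List.foldl_cons]
      rw [ih]
      congr 1
      rw [PySem.Set.add_eq_ite]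
      by_cases hm : x ∈ acc <;> simp [hm]

-- fold over a flatMap = nested fold
theorem pv_foldl_flatMap {α β γ : Type} (f : α → List β) (g : γ → β → γ) (l : List α) (init : γ) :
    (l.flatMap f).foldl g init = l.foldl (fun acc a => (f a).foldl g acc) init := by
  induction l generalizing init with
  | nil => rfl
  | cons x t ih => simp [List.flatMap_cons, List.foldl_append, ih]

-- ===== VERDICT (by name: the statement is the Claim_ definition above) =====
theorem get_homologous_proteins_spec : Claim_equal_get_homologous_proteins := by
  intro l _hdom hpre
  unfold Spec_get_homologous_proteins
  obtain ⟨hnd, -⟩ := hpre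
  have hfn : ∀ pd ∈ l.map (fun pd => (pd.1, PySem.Set.ofList (pd.2.map pvFirstChar))),
      (pd.2 : List Char).Nodup := by
    intro pd hpd
    rcases List.mem_map.mp hpd with ⟨qd, -, rfl⟩
    exact PySem.Set.nodup_ofList _
  have hdp : (l.map (fun pd => (pd.1, PySem.Set.ofList (pd.2.map pvFirstChar)))).foldl
      (fun d pd => pd.2.foldl (fun d c => d.modify c PySem.Set.empty (fun s => PySem.Set.add s pd.1)) d)
      PySem.Dict.empty
      = (l.map (fun pd => (pd.1, PySem.Set.ofList (pd.2.map pvFirstChar)))).foldl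
          (fun d pd => pd.2.foldl (fun d c => d.modify c [] (fun l => l ++ [pd.1])) d)
          PySem.Dict.empty := by
    rw [List.foldl_map, List.foldl_map]
    exact pv_outer l PySem.Dict.empty hnd (by
      intro c q hq
      simp [PySem.Dict.getD_empty] at hq)
  simp only [get_homologous_proteins, get_homologous_proteins_alt]
  rw [hdp]
  apply List.map_congr_left
  intro pc hpc
  congr 1
  -- A side: each getD is the bucket, then remove = filter
  have hgetD : ∀ c : Char,
      ((l.map (fun pd => (pd.1, PySem.Set.ofList (pd.2.map pvFirstChar)))).foldl
        (fun d pd => pd.2.foldl (fun d c => d.modify c [] (fun l => l ++ [pd.1])) d)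
        PySem.Dict.empty).getD c PySem.Set.empty
      = pvBucket (l.map (fun pd => (pd.1, PySem.Set.ofList (pd.2.map pvFirstChar)))) c := by
    intro c
    have := pv_getD_scatter (l.map (fun pd => (pd.1, PySem.Set.ofList (pd.2.map pvFirstChar))))
      hfn PySem.Dict.empty c
    simpa [PySem.Dict.getD_empty, PySem.Set.empty] using this
  have hAstream : (pc.2.flatMap (fun c =>
      ((l.map (fun pd => (pd.1, PySem.Set.ofList (pd.2.map pvFirstChar)))).foldl
        (fun d pd => pd.2.foldl (fun d c => d.modify c [] (fun l => l ++ [pd.1])) d)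
        PySem.Dict.empty).getD c PySem.Set.empty))
      = pc.2.flatMap (fun c => pvBucket (l.map (fun pd => (pd.1, PySem.Set.ofList (pd.2.map pvFirstChar)))) c) := by
    exact List.flatMap_congr (fun c _ => hgetD c)
  rw [hAstream, pv_removeD]
  -- B side
  have hB : (pc.2.foldl (fun homologs c =>
        (l.map (fun pd => (pd.1, PySem.Set.ofList (pd.2.map pvFirstChar)))).foldl
          (fun homologs qd =>
            if PySem.Set.contains qd.2 c ∧ qd.1 ≠ pc.1 ∧ qd.1 ∉ homologs
            then homologs ++ [qd.1] else homologs) homologs)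
        ([] : List String))
      = ((pc.2.flatMap (fun c => pvBucket (l.map (fun pd => (pd.1, PySem.Set.ofList (pd.2.map pvFirstChar)))) c)).filter
          (fun q => q ≠ pc.1)).foldl PySem.Set.add [] := by
    have h1 : ∀ (acc : List String), pc.2.foldl (fun homologs c =>
        (l.map (fun pd => (pd.1, PySem.Set.ofList (pd.2.map pvFirstChar)))).foldl
          (fun homologs qd =>
            if PySem.Set.contains qd.2 c ∧ qd.1 ≠ pc.1 ∧ qd.1 ∉ homologs
            then homologs ++ [qd.1] else homologs) homologs) acc
      = pc.2.foldl (fun homologs c =>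
          (pvBucket (l.map (fun pd => (pd.1, PySem.Set.ofList (pd.2.map pvFirstChar)))) c).foldl
            (fun h q => if q ≠ pc.1 ∧ q ∉ h then h ++ [q] else h) homologs) acc := by
      intro acc
      exact List.foldl_ext _ _ acc (fun a c _ => pv_inner_scan _ c pc.1 a)
    rw [h1]
    rw [← pv_foldl_flatMap]
    rw [pv_skip_eq_add]
  rw [hB]
  rw [← PySem.Set.ofList_eq_foldl]
  rw [PySem.Set.ofList_ofList]

theorem get_homologous_proteins_raises : Claim_raises_get_homologous_proteins := by
  unfold Claim_raises_get_homologous_proteins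
  constructor
  · intro l _hdom hr hpre
    obtain ⟨pd, hmem, hempty⟩ := hr.2.2
    exact (hpre.2 pd hmem).1 hempty
  · decide

-- sanity corollary of the crash-fix claim: the raise witness indeed lies outside Pre_
theorem pvRaiseWitness_notPre_ok : ¬ Pre_get_homologous_proteins pvRaiseWitness_get_homologous_proteins :=
  get_homologous_proteins_raises.1 _ (by decide) (by decide)
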